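-- pv_equiv track=rewrite | github.com/KennyKvn001/KennyKevinMugisha_rl_summative | custom_env/map_generator.py | _create_maze_roads
-- ===== SOURCE A (Python) =====
-- from typing import List, Tuple, Dict
--
-- def _create_maze_roads(
--     destinations: Dict, height: int, width: int
-- ) -> List[Tuple[int, int]]:
--     """Create maze-like road patterns around destinations"""
--     roads = []
--
--     # Create L-shaped and zigzag patterns
--     for dest_name, (dest_row, dest_col) in destinations.items():
--         # Create L-shaped access roads
--         if dest_name == "hospital":
--             # Complex path to hospital
--             roads.extend([(dest_row, c) for c in range(dest_col, dest_col + 6)])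
--             roads.extend([(r, dest_col + 5) for r in range(dest_row, dest_row + 4)])
--             roads.extend(
--                 [(dest_row + 3, c) for c in range(dest_col + 5, dest_col + 10)]
--             )
--
--         elif dest_name == "home":
--             # Zigzag path to home
--             roads.extend([(dest_row, c) for c in range(dest_col - 6, dest_col)])
--             roads.extend([(r, dest_col - 6) for r in range(dest_row, dest_row + 3)])
--             roads.extend([(dest_row + 2, c) for c in range(dest_col - 8, dest_col - 6)])
--
--         elif dest_name == "bank":
--             # Spiral approach to bank
--             roads.extend([(dest_row, c) for c in range(dest_col, dest_col + 5)])
--             roads.extend([(r, dest_col + 4) for r in range(dest_row - 4, dest_row)])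
--             roads.extend([(dest_row - 4, c) for c in range(dest_col + 4, dest_col + 8)])
--
--         elif dest_name == "park":
--             # Multi-level path to park
--             roads.extend([(dest_row, c) for c in range(dest_col - 5, dest_col)])
--             roads.extend([(r, dest_col - 5) for r in range(dest_row - 3, dest_row)])
--             roads.extend([(dest_row - 3, c) for c in range(dest_col - 8, dest_col - 5)])
--
--     return roads
-- ===== SOURCE B (Python) =====
-- # Data-driven rewrite: one static pattern table + one run helper replace the
-- # four name branches and twelve literal extend calls (objective: simpler).
-- _PATTERNS = {
--     "hospital": [("R", 0, 0, 6), ("C", 5, 0, 4), ("R", 3, 5, 5)],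
--     "home":     [("R", 0, -6, 6), ("C", -6, 0, 3), ("R", 2, -8, 2)],
--     "bank":     [("R", 0, 0, 5), ("C", 4, -4, 4), ("R", -4, 4, 4)],
--     "park":     [("R", 0, -5, 5), ("C", -5, -3, 3), ("R", -3, -8, 3)],
-- }
--
--
-- def _run(kind, r, c, fixed, start, n):
--     if kind == "R":
--         return [(r + fixed, cc) for cc in range(c + start, c + start + n)]
--     return [(rr, c + fixed) for rr in range(r + start, r + start + n)]
--
--
-- def _create_maze_roads(destinations, height, width):
--     roads = []
--     for name, (r, c) in destinations.items():
--         for kind, fixed, start, n in _PATTERNS.get(name, ()):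
--             roads.extend(_run(kind, r, c, fixed, start, n))
--     return roads
-- ===== Notes on version B (the rewrite author's own statement) =====
-- stated objective: simpler
-- what changed: Replaces the four name-specific if/elif branches with twelve literal list comprehensions by a static pattern table mapping each destination name to three (orientation, fixed-offset, start-offset, length) segment descriptors, emitted by one shared run helper in a data-driven loop.
import Mathlib
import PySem

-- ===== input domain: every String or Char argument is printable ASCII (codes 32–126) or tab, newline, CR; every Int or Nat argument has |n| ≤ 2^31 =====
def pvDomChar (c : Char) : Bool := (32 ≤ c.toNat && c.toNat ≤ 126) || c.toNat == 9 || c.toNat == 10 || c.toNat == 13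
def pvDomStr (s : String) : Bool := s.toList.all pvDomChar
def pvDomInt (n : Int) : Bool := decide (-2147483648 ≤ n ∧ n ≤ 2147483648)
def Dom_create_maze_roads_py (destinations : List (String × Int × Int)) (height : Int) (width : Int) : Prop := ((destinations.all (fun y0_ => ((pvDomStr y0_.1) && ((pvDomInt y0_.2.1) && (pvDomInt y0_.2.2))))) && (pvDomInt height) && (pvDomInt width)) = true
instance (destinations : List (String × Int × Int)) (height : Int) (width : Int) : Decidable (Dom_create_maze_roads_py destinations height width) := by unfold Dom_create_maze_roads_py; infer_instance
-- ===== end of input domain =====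

-- B replaces A's four name branches by a static segment-descriptor table and one
-- run helper (objective: simpler); same return value on every input.

-- ===== PORT A =====
def create_maze_roads_py (destinations : List (String × Int × Int)) (height : Int) (width : Int) : List (Int × Int) :=
  destinations.foldl (fun roads dest =>
    let r := dest.2.1
    let c := dest.2.2
    if dest.1 == "hospital" then
      roads ++ (PySem.List.pyRange c (c + 6) 1).map (fun cc => (r, cc))
            ++ (PySem.List.pyRange r (r + 4) 1).map (fun rr => (rr, c + 5))
            ++ (PySem.List.pyRange (c + 5) (c + 10) 1).map (fun cc => (r + 3, cc))
    else if dest.1 == "home" then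
      roads ++ (PySem.List.pyRange (c - 6) c 1).map (fun cc => (r, cc))
            ++ (PySem.List.pyRange r (r + 3) 1).map (fun rr => (rr, c - 6))
            ++ (PySem.List.pyRange (c - 8) (c - 6) 1).map (fun cc => (r + 2, cc))
    else if dest.1 == "bank" then
      roads ++ (PySem.List.pyRange c (c + 5) 1).map (fun cc => (r, cc))
            ++ (PySem.List.pyRange (r - 4) r 1).map (fun rr => (rr, c + 4))
            ++ (PySem.List.pyRange (c + 4) (c + 8) 1).map (fun cc => (r - 4, cc))
    else if dest.1 == "park" then
      roads ++ (PySem.List.pyRange (c - 5) c 1).map (fun cc => (r, cc))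
            ++ (PySem.List.pyRange (r - 3) r 1).map (fun rr => (rr, c - 5))
            ++ (PySem.List.pyRange (c - 8) (c - 5) 1).map (fun cc => (r - 3, cc))
    else roads) []

-- ===== PORT B =====
def pvRun (kind : String) (r c fixed start n : Int) : List (Int × Int) :=
  if kind == "R" then
    (PySem.List.pyRange (c + start) (c + start + n) 1).map (fun cc => (r + fixed, cc))
  else
    (PySem.List.pyRange (r + start) (r + start + n) 1).map (fun rr => (rr, c + fixed))

def pvPatterns : PySem.Dict String (List (String × Int × Int × Int)) :=
  PySem.Dict.ofList
    [ ("hospital", [("R", 0, 0, 6), ("C", 5, 0, 4), ("R", 3, 5, 5)]),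
      ("home",     [("R", 0, -6, 6), ("C", -6, 0, 3), ("R", 2, -8, 2)]),
      ("bank",     [("R", 0, 0, 5), ("C", 4, -4, 4), ("R", -4, 4, 4)]),
      ("park",     [("R", 0, -5, 5), ("C", -5, -3, 3), ("R", -3, -8, 3)]) ]

def create_maze_roads_py_alt (destinations : List (String × Int × Int)) (height : Int) (width : Int) : List (Int × Int) :=
  destinations.foldl (fun roads dest =>
    (pvPatterns.getD dest.1 []).foldl
      (fun acc seg => acc ++ pvRun seg.1 dest.2.1 dest.2.2 seg.2.1 seg.2.2.1 seg.2.2.2)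
      roads) []

-- ===== PRECONDITION & SPEC =====
def Spec_create_maze_roads_py (destinations : List (String × Int × Int)) (height : Int) (width : Int) (out : List (Int × Int)) : Prop := out = create_maze_roads_py_alt destinations height width
instance (destinations : List (String × Int × Int)) (height : Int) (width : Int) (out : List (Int × Int)) : Decidable (Spec_create_maze_roads_py destinations height width out) := by unfold Spec_create_maze_roads_py; infer_instance

-- ===== CLAIM (what is proved, stated in full; the proofs are below) =====
def Claim_equal_create_maze_roads_py : Prop := ∀ (destinations : List (String × Int × Int)) (height : Int) (width : Int), Dom_create_maze_roads_py destinations height width → Spec_create_maze_roads_py destinations height width (create_maze_roads_py destinations height width)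

-- ===== LEMMAS AND PROOFS =====

theorem pv_step_eq (roads : List (Int × Int)) (dest : String × Int × Int) :
    (let r := dest.2.1
     let c := dest.2.2
     if dest.1 == "hospital" then
       roads ++ (PySem.List.pyRange c (c + 6) 1).map (fun cc => (r, cc))
             ++ (PySem.List.pyRange r (r + 4) 1).map (fun rr => (rr, c + 5))
             ++ (PySem.List.pyRange (c + 5) (c + 10) 1).map (fun cc => (r + 3, cc))
     else if dest.1 == "home" then
       roads ++ (PySem.List.pyRange (c - 6) c 1).map (fun cc => (r, cc))
             ++ (PySem.List.pyRange r (r + 3) 1).map (fun rr => (rr, c - 6))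
             ++ (PySem.List.pyRange (c - 8) (c - 6) 1).map (fun cc => (r + 2, cc))
     else if dest.1 == "bank" then
       roads ++ (PySem.List.pyRange c (c + 5) 1).map (fun cc => (r, cc))
             ++ (PySem.List.pyRange (r - 4) r 1).map (fun rr => (rr, c + 4))
             ++ (PySem.List.pyRange (c + 4) (c + 8) 1).map (fun cc => (r - 4, cc))
     else if dest.1 == "park" then
       roads ++ (PySem.List.pyRange (c - 5) c 1).map (fun cc => (r, cc))
             ++ (PySem.List.pyRange (r - 3) r 1).map (fun rr => (rr, c - 5))
             ++ (PySem.List.pyRange (c - 8) (c - 5) 1).map (fun cc => (r - 3, cc))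
     else roads)
    = (pvPatterns.getD dest.1 []).foldl
        (fun acc seg => acc ++ pvRun seg.1 dest.2.1 dest.2.2 seg.2.1 seg.2.2.1 seg.2.2.2)
        roads := by
  have hpat : pvPatterns = PySem.Dict.mk
      [ ("hospital", [("R", 0, 0, 6), ("C", 5, 0, 4), ("R", 3, 5, 5)]),
        ("home",     [("R", 0, -6, 6), ("C", -6, 0, 3), ("R", 2, -8, 2)]),
        ("bank",     [("R", 0, 0, 5), ("C", 4, -4, 4), ("R", -4, 4, 4)]),
        ("park",     [("R", 0, -5, 5), ("C", -5, -3, 3), ("R", -3, -8, 3)]) ] := by decide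
  obtain ⟨name, r, c⟩ := dest
  by_cases h1 : name = "hospital"
  · subst h1; simp [hpat, pvRun, PySem.Dict.getD, PySem.Dict.get?_mk_cons]; ring_nf
  by_cases h2 : name = "home"
  · subst h2; simp [hpat, pvRun, PySem.Dict.getD, PySem.Dict.get?_mk_cons]; ring_nf
  by_cases h3 : name = "bank"
  · subst h3; simp [hpat, pvRun, PySem.Dict.getD, PySem.Dict.get?_mk_cons]; ring_nf
  by_cases h4 : name = "park"
  · subst h4; simp [hpat, pvRun, PySem.Dict.getD, PySem.Dict.get?_mk_cons]; ring_nf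
  · simp [hpat, PySem.Dict.getD, PySem.Dict.get?, h1, h2, h3, h4, Ne.symm h1, Ne.symm h2, Ne.symm h3, Ne.symm h4]

theorem pv_foldl_eq (destinations : List (String × Int × Int)) (roads : List (Int × Int)) :
    destinations.foldl (fun roads dest =>
      let r := dest.2.1
      let c := dest.2.2
      if dest.1 == "hospital" then
        roads ++ (PySem.List.pyRange c (c + 6) 1).map (fun cc => (r, cc))
              ++ (PySem.List.pyRange r (r + 4) 1).map (fun rr => (rr, c + 5))
              ++ (PySem.List.pyRange (c + 5) (c + 10) 1).map (fun cc => (r + 3, cc))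
      else if dest.1 == "home" then
        roads ++ (PySem.List.pyRange (c - 6) c 1).map (fun cc => (r, cc))
              ++ (PySem.List.pyRange r (r + 3) 1).map (fun rr => (rr, c - 6))
              ++ (PySem.List.pyRange (c - 8) (c - 6) 1).map (fun cc => (r + 2, cc))
      else if dest.1 == "bank" then
        roads ++ (PySem.List.pyRange c (c + 5) 1).map (fun cc => (r, cc))
              ++ (PySem.List.pyRange (r - 4) r 1).map (fun rr => (rr, c + 4))
              ++ (PySem.List.pyRange (c + 4) (c + 8) 1).map (fun cc => (r - 4, cc))
      else if dest.1 == "park" then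
        roads ++ (PySem.List.pyRange (c - 5) c 1).map (fun cc => (r, cc))
              ++ (PySem.List.pyRange (r - 3) r 1).map (fun rr => (rr, c - 5))
              ++ (PySem.List.pyRange (c - 8) (c - 5) 1).map (fun cc => (r - 3, cc))
      else roads) roads
    = destinations.foldl (fun roads dest =>
        (pvPatterns.getD dest.1 []).foldl
          (fun acc seg => acc ++ pvRun seg.1 dest.2.1 dest.2.2 seg.2.1 seg.2.2.1 seg.2.2.2)
          roads) roads := by
  induction destinations generalizing roads with
  | nil => rfl
  | cons d rest ih =>
      simp only [List.foldl_cons]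
      rw [pv_step_eq, ih]

-- ===== VERDICT (by name: the statement is the Claim_ definition above) =====
theorem create_maze_roads_py_spec : Claim_equal_create_maze_roads_py := by
  intro destinations height width _
  unfold Spec_create_maze_roads_py create_maze_roads_py create_maze_roads_py_alt
  exact pv_foldl_eq destinations []
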